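-- pv_equiv track=rewrite | github.com/gbank/CLOS-Simulations | Related_Protocols/clos.py | getRelabelMap
-- ===== SOURCE A (Python) =====
-- def getRelabelMap(k, target, variant):
--     assert target < k*(k//2)
--     assert variant == 1 or variant == 2
--
--     inside_pod_shift = target % (k//2)
--     pod_shift = target // (k//2)
--
--     map = {}
--     insidePodMorphMap = {}
--     podMorphMap = {}
--
--     #Creat Map for morphing inside pod
--     for p in range(0,k):
--         for i in range(0, k//2):
--             insidePodMorphMap['acc' + str(p*(k//2)+i)] = 'acc' + str(p*(k//2) + ((i + inside_pod_shift) % (k//2)))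
--     #Remap Agg Layer
--     for p in range(0,k):
--         for i in range(0, k//2):
--             insidePodMorphMap['agg' + str(p*(k//2)+i)] = 'agg' + str(p*(k//2) + ((i + inside_pod_shift) % (k//2)))
--     #Remap Core # Core group shifts by (k//2)*target
--     for i in range(0, (k//2) * (k//2)):
--         insidePodMorphMap['core' + str(i)] =  'core' + str((i + inside_pod_shift*(k//2)) % ((k//2)*(k//2)))
--
--     #Create Map for morphing accross pod
--     for i in range(0,k * (k //2)):
--         podMorphMap['acc' + str(i)] = 'acc' + str((i + (pod_shift * (k//2))) % (k* (k//2)))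
--
--     #Remap Agg Layer
--     for i in range(0,k * (k //2)):
--         podMorphMap['agg' + str(i)] = 'agg' + str((i + (pod_shift * (k//2))) % (k* (k//2)))
--
--     if variant == 1:
--     #Core nodes stay the same
--         for i in range(0, (k//2) * (k//2)):
--             podMorphMap['core' + str(i)] =  'core' + str(i)
--     else:
--         for b in range(0, k//2):
--             for i in range(0,k//2):
--                 podMorphMap['core' + str(b*(k//2) + i)] = 'core' + str(b*(k//2) + (i + pod_shift)%(k//2))
--
--
--     for node in insidePodMorphMap.keys():
--         map[node] = podMorphMap[insidePodMorphMap[node]]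
--     return map
-- ===== SOURCE B (Python) =====
-- def getRelabelMap(k, target, variant):
--     assert target < k*(k//2)
--     assert variant == 1 or variant == 2
--
--     h = k // 2
--     n = k * h
--     inside_pod_shift = target % h
--     pod_shift = target // h
--
--     def core(i):
--         c = (i + inside_pod_shift * h) % (h * h)
--         if variant == 2:
--             c = c - c % h + (c % h + pod_shift) % h
--         return c
--
--     # one pass per layer: emit the composed relabel target directly
--     return dict([('acc' + str(p*h + i), 'acc' + str((p*h + (i + inside_pod_shift) % h + pod_shift*h) % n))
--                  for p in range(k) for i in range(h)]
--               + [('agg' + str(p*h + i), 'agg' + str((p*h + (i + inside_pod_shift) % h + pod_shift*h) % n))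
--                  for p in range(k) for i in range(h)]
--               + [('core' + str(i), 'core' + str(core(i))) for i in range(h * h)])
-- ===== Notes on version B (the rewrite author's own statement) =====
-- stated objective: simpler
-- what changed: B emits the final relabel map directly in one pass per layer with the composed index formula, instead of building insidePodMorphMap and podMorphMap as dicts and composing them by lookups in a final pass.
import Mathlib
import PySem

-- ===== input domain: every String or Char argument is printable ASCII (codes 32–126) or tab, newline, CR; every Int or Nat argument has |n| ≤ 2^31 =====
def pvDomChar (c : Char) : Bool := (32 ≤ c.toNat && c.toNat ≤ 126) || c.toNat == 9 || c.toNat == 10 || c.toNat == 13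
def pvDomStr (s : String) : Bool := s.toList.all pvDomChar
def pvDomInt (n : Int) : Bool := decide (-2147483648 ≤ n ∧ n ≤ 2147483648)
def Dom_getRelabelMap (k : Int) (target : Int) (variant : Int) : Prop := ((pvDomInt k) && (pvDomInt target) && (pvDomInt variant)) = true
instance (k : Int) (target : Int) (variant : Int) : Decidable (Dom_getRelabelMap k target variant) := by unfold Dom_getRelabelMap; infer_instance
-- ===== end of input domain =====

-- B builds the final relabel map directly, one pass per layer with the composed index formula,
-- instead of A's two intermediate dicts composed by lookups in a final pass (objective: simpler).

-- ===== PORT A =====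
def getRelabelMap (k : Int) (target : Int) (variant : Int) : List (String × String) :=
  -- inside_pod_shift = target % (k//2);  pod_shift = target // (k//2)
  let h : Int := PySem.Int.floordiv k 2
  let ips : Int := PySem.Int.mod target h
  let ps : Int := PySem.Int.floordiv target h
  -- insidePodMorphMap: acc loop, agg loop, core loop
  let ipm : PySem.Dict String String :=
    (PySem.List.pyRange 0 k).foldl (fun d p =>
      (PySem.List.pyRange 0 h).foldl (fun d i =>
        d.insert ("acc" ++ PySem.Int.toStr (p * h + i))
                 ("acc" ++ PySem.Int.toStr (p * h + PySem.Int.mod (i + ips) h))) d)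
      PySem.Dict.empty
  let ipm : PySem.Dict String String :=
    (PySem.List.pyRange 0 k).foldl (fun d p =>
      (PySem.List.pyRange 0 h).foldl (fun d i =>
        d.insert ("agg" ++ PySem.Int.toStr (p * h + i))
                 ("agg" ++ PySem.Int.toStr (p * h + PySem.Int.mod (i + ips) h))) d)
      ipm
  let ipm : PySem.Dict String String :=
    (PySem.List.pyRange 0 (h * h)).foldl (fun d i =>
      d.insert ("core" ++ PySem.Int.toStr i)
               ("core" ++ PySem.Int.toStr (PySem.Int.mod (i + ips * h) (h * h)))) ipm
  -- podMorphMap: acc loop, agg loop, core branch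
  let pmm : PySem.Dict String String :=
    (PySem.List.pyRange 0 (k * h)).foldl (fun d i =>
      d.insert ("acc" ++ PySem.Int.toStr i)
               ("acc" ++ PySem.Int.toStr (PySem.Int.mod (i + ps * h) (k * h)))) PySem.Dict.empty
  let pmm : PySem.Dict String String :=
    (PySem.List.pyRange 0 (k * h)).foldl (fun d i =>
      d.insert ("agg" ++ PySem.Int.toStr i)
               ("agg" ++ PySem.Int.toStr (PySem.Int.mod (i + ps * h) (k * h)))) pmm
  let pmm : PySem.Dict String String :=
    if variant == 1 then
      (PySem.List.pyRange 0 (h * h)).foldl (fun d i =>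
        d.insert ("core" ++ PySem.Int.toStr i) ("core" ++ PySem.Int.toStr i)) pmm
    else
      (PySem.List.pyRange 0 h).foldl (fun d b =>
        (PySem.List.pyRange 0 h).foldl (fun d i =>
          d.insert ("core" ++ PySem.Int.toStr (b * h + i))
                   ("core" ++ PySem.Int.toStr (b * h + PySem.Int.mod (i + ps) h))) d) pmm
  -- map[node] = podMorphMap[insidePodMorphMap[node]]  (lookups total via getD; Pre_ guarantees the keys exist)
  let m : PySem.Dict String String :=
    ipm.keys.foldl (fun m node => m.insert node (pmm.getD (ipm.getD node "") "")) PySem.Dict.empty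
  m.items

-- ===== PORT B =====
def getRelabelMap_alt (k : Int) (target : Int) (variant : Int) : List (String × String) :=
  let h : Int := PySem.Int.floordiv k 2
  let n : Int := k * h
  let ips : Int := PySem.Int.mod target h
  let ps : Int := PySem.Int.floordiv target h
  let core : Int → Int := fun i =>
    let c := PySem.Int.mod (i + ips * h) (h * h)
    if variant == 2 then c - PySem.Int.mod c h + PySem.Int.mod (PySem.Int.mod c h + ps) h else c
  (PySem.Dict.ofList (
      (PySem.List.pyRange 0 k).flatMap (fun p => (PySem.List.pyRange 0 h).map (fun i =>
        ("acc" ++ PySem.Int.toStr (p * h + i),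
         "acc" ++ PySem.Int.toStr (PySem.Int.mod (p * h + PySem.Int.mod (i + ips) h + ps * h) n))))
      ++ (PySem.List.pyRange 0 k).flatMap (fun p => (PySem.List.pyRange 0 h).map (fun i =>
        ("agg" ++ PySem.Int.toStr (p * h + i),
         "agg" ++ PySem.Int.toStr (PySem.Int.mod (p * h + PySem.Int.mod (i + ips) h + ps * h) n))))
      ++ (PySem.List.pyRange 0 (h * h)).map (fun i =>
        ("core" ++ PySem.Int.toStr i, "core" ++ PySem.Int.toStr (core i))))).items

-- ===== PRECONDITION & SPEC =====
-- Pre_ holds exactly where Python A returns normally: the asserts require target < k*(k//2) and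
-- variant ∈ {1,2}; for k ∈ {0,1} A raises ZeroDivisionError (k//2 = 0), and for k ≤ -2 with
-- variant 2 it raises KeyError (the variant-2 core loops over range(0, k//2) are empty while
-- insidePodMorphMap still has core keys).
def Pre_getRelabelMap (k : Int) (target : Int) (variant : Int) : Prop :=
  (2 ≤ k ∨ (k ≤ -2 ∧ variant = 1)) ∧ target < k * PySem.Int.floordiv k 2 ∧ (variant = 1 ∨ variant = 2)

instance (k : Int) (target : Int) (variant : Int) : Decidable (Pre_getRelabelMap k target variant) := by unfold Pre_getRelabelMap; infer_instance

def pvWitness_getRelabelMap : Int × Int × Int := (2, 1, 1)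

def Spec_getRelabelMap (k : Int) (target : Int) (variant : Int) (out : List (String × String)) : Prop := out = getRelabelMap_alt k target variant
instance (k : Int) (target : Int) (variant : Int) (out : List (String × String)) : Decidable (Spec_getRelabelMap k target variant out) := by unfold Spec_getRelabelMap; infer_instance

-- ===== CLAIM (what is proved, stated in full; the proofs are below) =====
def Claim_equal_getRelabelMap : Prop := ∀ (k : Int) (target : Int) (variant : Int), Dom_getRelabelMap k target variant → Pre_getRelabelMap k target variant → Spec_getRelabelMap k target variant (getRelabelMap k target variant)

-- ===== LEMMAS AND PROOFS =====

theorem pvDigitCharVal {d : Nat} (hd : d < 10) : (Nat.digitChar d).toNat - 48 = d := by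
  interval_cases d <;> decide

theorem pvToDigitsVal (n : Nat) :
    (Nat.toDigits 10 n).foldl (fun a c => 10 * a + (c.toNat - 48)) 0 = n := by
  induction n using Nat.strong_induction_on with
  | _ n ih =>
    rw [Nat.toDigits_eq_if (by norm_num)]
    by_cases h : n < 10
    · simp [h, List.foldl, pvDigitCharVal h]
    · simp only [h, if_false, List.foldl_append, List.foldl]
      rw [ih (n / 10) (Nat.div_lt_self (by omega) (by norm_num))]
      have := pvDigitCharVal (Nat.mod_lt n (y := 10) (by norm_num))
      omega

theorem pvToDigitsInj {a b : Nat} (h : Nat.toDigits 10 a = Nat.toDigits 10 b) : a = b := by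
  have := pvToDigitsVal a
  rw [h, pvToDigitsVal b] at this
  omega

theorem pvToStrInj {a b : Int} (ha : 0 ≤ a) (hb : 0 ≤ b)
    (h : PySem.Int.toStr a = PySem.Int.toStr b) : a = b := by
  have h2 : PySem.Int.toChars a = PySem.Int.toChars b := by
    have := congrArg String.toList h
    simpa [PySem.Int.toList_toStr] using this
  simp only [PySem.Int.toChars, if_neg (by omega : ¬ a < 0), if_neg (by omega : ¬ b < 0)] at h2
  have := pvToDigitsInj h2
  omega

theorem pvAppendCancel {P s t : String} (h : P ++ s = P ++ t) : s = t := by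
  have := congrArg String.toList h
  simp only [String.toList_append] at this
  exact String.toList_inj.mp (List.append_cancel_left this)

theorem pvAccNeAgg (s t : String) : ("acc" ++ s) ≠ ("agg" ++ t) := by
  intro h
  have := congrArg String.toList h
  simp [String.toList_append] at this

theorem pvAccNeCore (s t : String) : ("acc" ++ s) ≠ ("core" ++ t) := by
  intro h
  have := congrArg String.toList h
  simp [String.toList_append] at this

theorem pvAggNeCore (s t : String) : ("agg" ++ s) ≠ ("core" ++ t) := by
  intro h
  have := congrArg String.toList h
  simp [String.toList_append] at this

def pvSec (P : String) (m : Int) (f : Int → Int) : List (String × String) :=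
  (PySem.List.pyRange 0 m).map (fun j => (P ++ PySem.Int.toStr j, P ++ PySem.Int.toStr (f j)))

theorem pvFindUnique {α : Type} {l : List α} {p : α → Bool} {v : α} (hv : v ∈ l)
    (h : ∀ x ∈ l, (p x = true ↔ x = v)) : l.find? p = some v := by
  induction l with
  | nil => cases hv
  | cons a t ih =>
    by_cases hp : p a = true
    · have : a = v := (h a (List.mem_cons_self)).mp hp
      subst this; simp [List.find?, hp]
    · have hav : a ≠ v := fun he => hp ((h a List.mem_cons_self).mpr he)
      have hv' : v ∈ t := by
        rcases List.mem_cons.mp hv with rfl | hv2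
        · exact absurd rfl hav
        · exact hv2
      simp only [List.find?, hp]
      simpa using ih hv' (fun x hx => h x (List.mem_cons_of_mem _ hx))

theorem pvGetAppend {l1 l2 : List (String × String)} {x : String} :
    (PySem.Dict.mk (l1 ++ l2)).get? x = ((PySem.Dict.mk l1).get? x).or ((PySem.Dict.mk l2).get? x) := by
  simp [PySem.Dict.get?, List.find?_append, Option.map_or]

theorem pvGetSec {P : String} {m : Int} {f : Int → Int} {v : Int} (h0 : 0 ≤ v) (hm : v < m) :
    (PySem.Dict.mk (pvSec P m f)).get? (P ++ PySem.Int.toStr v) = some (P ++ PySem.Int.toStr (f v)) := by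
  have hfind : (PySem.List.pyRange 0 m).find?
      ((fun p => p.1 == (P ++ PySem.Int.toStr v)) ∘ (fun j => (P ++ PySem.Int.toStr j, P ++ PySem.Int.toStr (f j)))) = some v := by
    apply pvFindUnique
    · exact PySem.List.mem_pyRange_one.mpr ⟨h0, hm⟩
    · intro x hx
      have hx0 : 0 ≤ x := (PySem.List.mem_pyRange_one.mp hx).1
      simp only [Function.comp, beq_iff_eq]
      constructor
      · intro he; exact pvToStrInj hx0 h0 (pvAppendCancel he)
      · intro he; subst he; rfl
  simp only [PySem.Dict.get?, pvSec, List.find?_map, hfind, Option.map_some]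

theorem pvSkipSec {P : String} {m : Int} {f : Int → Int} {x : String}
    (hx : ∀ j : Int, (P ++ PySem.Int.toStr j) ≠ x) (l2 : List (String × String)) :
    (PySem.Dict.mk (pvSec P m f ++ l2)).get? x = (PySem.Dict.mk l2).get? x := by
  rw [pvGetAppend]
  have : (PySem.Dict.mk (pvSec P m f)).get? x = none := by
    simp only [PySem.Dict.get?, Option.map_eq_none_iff, List.find?_eq_none, pvSec]
    intro p hp
    rcases List.mem_map.mp hp with ⟨j, _, rfl⟩
    simpa using hx j
  simp [this]

theorem pvKeysNodup (P : String) (m : Int) :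
    (((PySem.List.pyRange 0 m)).map (fun j => P ++ PySem.Int.toStr j)).Nodup := by
  apply List.Nodup.map_on _ (PySem.List.nodup_pyRange_one 0 m)
  intro x hx y hy he
  exact pvToStrInj (PySem.List.mem_pyRange_one.mp hx).1 (PySem.List.mem_pyRange_one.mp hy).1 (pvAppendCancel he)

theorem pvNestedFold {α : Type} (K H : Int) (F : α → Int → Int → α) (d0 : α) :
    (PySem.List.pyRange 0 K).foldl (fun d p => (PySem.List.pyRange 0 H).foldl (fun d i => F d p i) d) d0
      = ((PySem.List.pyRange 0 K).flatMap (fun p => (PySem.List.pyRange 0 H).map (fun i => (p, i)))).foldl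
          (fun d pi => F d pi.1 pi.2) d0 := by
  rw [List.foldl_flatMap]
  simp only [List.foldl_map]

theorem pvFlatRangeNat {α : Type} (N : Nat) (H : Int) (hH : 0 < H) (g : Int → Int → α) (g' : Int → α)
    (hg : ∀ p i : Int, 0 ≤ p → 0 ≤ i → i < H → g p i = g' (p * H + i)) :
    (PySem.List.pyRange 0 (N : Int)).flatMap (fun p => (PySem.List.pyRange 0 H).map (fun i => g p i))
      = (PySem.List.pyRange 0 ((N : Int) * H)).map g' := by
  induction N with
  | zero => simp [PySem.List.pyRange_one_eq_nil]
  | succ N ih =>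
    have hcast : ((N + 1 : Nat) : Int) = (N : Int) + 1 := by push_cast; ring
    rw [hcast, PySem.List.pyRange_one_succ_right (by positivity), List.flatMap_append, ih]
    have hsplit : PySem.List.pyRange 0 (((N : Int) + 1) * H)
        = PySem.List.pyRange 0 ((N : Int) * H) ++ PySem.List.pyRange ((N : Int) * H) (((N : Int) + 1) * H) := by
      exact PySem.List.pyRange_one_append 0 ((N : Int) * H) (((N : Int) + 1) * H) (by positivity) (by nlinarith)
    rw [hsplit, List.map_append]
    congr 1
    rw [PySem.List.pyRange_one ((N : Int) * H) (((N : Int) + 1) * H), PySem.List.pyRange_one 0 H]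
    have hlen : (((N : Int) + 1) * H - (N : Int) * H).toNat = (H - 0).toNat := by
      congr 1; ring
    rw [hlen]
    simp only [List.flatMap_cons, List.flatMap_nil, List.append_nil, List.map_map]
    apply List.map_congr_left
    intro t ht
    have htH : (t : Int) < H := by
      have h1 := List.mem_range.mp ht
      omega
    simp only [Function.comp_apply]
    rw [hg (N : Int) (0 + (t : Int)) (by positivity) (by positivity) (by omega)]
    congr 1
    ring

theorem pvFlatRange {α : Type} (K H : Int) (hH : 0 < H) (g : Int → Int → α) (g' : Int → α)
    (hg : ∀ p i : Int, 0 ≤ p → 0 ≤ i → i < H → g p i = g' (p * H + i)) :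
    (PySem.List.pyRange 0 K).flatMap (fun p => (PySem.List.pyRange 0 H).map (fun i => g p i))
      = (PySem.List.pyRange 0 (K * H)).map g' := by
  by_cases hK : K ≤ 0
  · have hKH : K * H ≤ 0 := by nlinarith [hH.le]
    rw [PySem.List.pyRange_one_eq_nil hK, PySem.List.pyRange_one_eq_nil hKH]
    simp
  · have : K = (K.toNat : Int) := by omega
    rw [this]
    exact pvFlatRangeNat K.toNat H hH g g' hg

theorem pvModSplit {h p i : Int} (hh : 0 < h) (h0 : 0 ≤ i) (hi : i < h) :
    PySem.Int.mod (p * h + i) h = i := by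
  rw [PySem.Int.mod_eq_emod_of_pos hh]
  rw [show p * h + i = i + h * p by ring, Int.add_mul_emod_self_left]
  exact Int.emod_eq_of_lt h0 hi

theorem pvG1Bounds {k h j ips : Int} (hk : 2 ≤ k) (hh : 0 < h) (hj0 : 0 ≤ j) (hjn : j < k * h) :
    0 ≤ j - PySem.Int.mod j h + PySem.Int.mod (PySem.Int.mod j h + ips) h
      ∧ j - PySem.Int.mod j h + PySem.Int.mod (PySem.Int.mod j h + ips) h < k * h := by
  have e1 : PySem.Int.mod j h = j % h := PySem.Int.mod_eq_emod_of_pos hh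
  have e2 := PySem.Int.mod_nonneg (a := PySem.Int.mod j h + ips) hh
  have e3 := PySem.Int.mod_lt (a := PySem.Int.mod j h + ips) hh
  have hq0 : 0 ≤ j / h := Int.ediv_nonneg hj0 (le_of_lt hh)
  have hqk : j / h < k := by
    rw [Int.ediv_lt_iff_lt_mul hh]; exact hjn
  have hqh : h * (j / h) ≤ h * (k - 1) := by
    have : j / h ≤ k - 1 := by omega
    exact mul_le_mul_of_nonneg_left this (le_of_lt hh)
  have hd : j % h = j - h * (j / h) := by rw [Int.emod_def]
  have hr : h * (k - 1) = k * h - h := by ring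
  have hg0 : 0 ≤ h * (j / h) := mul_nonneg (le_of_lt hh) hq0
  constructor <;> omega

def pvG1 (h ips : Int) (j : Int) : Int :=
  j - PySem.Int.mod j h + PySem.Int.mod (PySem.Int.mod j h + ips) h

theorem pvMemSec {P : String} {m : Int} {f : Int → Int} {q : String × String} (hq : q ∈ pvSec P m f) :
    ∃ j : Int, q.1 = P ++ PySem.Int.toStr j := by
  rcases List.mem_map.mp hq with ⟨j, _, rfl⟩
  exact ⟨j, rfl⟩

theorem pvNotContainsOfItems {d : PySem.Dict String String} {l : List (String × String)} {x : String}
    (h : d.items = l) (hx : ∀ p ∈ l, p.1 ≠ x) : d.contains x = false := by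
  have : d.contains x = l.any (fun p => p.1 == x) := by
    rw [PySem.Dict.contains, h]
  rw [this, List.any_eq_false]
  intro p hp
  simpa using hx p hp

theorem pvSingleInsertItems (M : Int) (P : String) (vf : Int → Int) (d : PySem.Dict String String)
    (hfresh : ∀ j : Int, 0 ≤ j → j < M → d.contains (P ++ PySem.Int.toStr j) = false) :
    ((PySem.List.pyRange 0 M).foldl (fun d i =>
        d.insert (P ++ PySem.Int.toStr i) (P ++ PySem.Int.toStr (vf i))) d).items
      = d.items ++ pvSec P M vf := by
  exact PySem.Dict.items_foldl_insert_fresh (PySem.List.pyRange 0 M)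
    (fun i => P ++ PySem.Int.toStr i) (fun i => P ++ PySem.Int.toStr (vf i)) d
    (fun a ha => hfresh a (PySem.List.mem_pyRange_one.mp ha).1 (PySem.List.mem_pyRange_one.mp ha).2)
    (pvKeysNodup P M)

theorem pvNestedInsertItems (K H : Int) (hH : 0 < H) (P : String) (vf : Int → Int → Int) (vf' : Int → Int)
    (hvf : ∀ p i : Int, 0 ≤ p → 0 ≤ i → i < H → vf p i = vf' (p * H + i))
    (d : PySem.Dict String String)
    (hfresh : ∀ j : Int, 0 ≤ j → j < K * H → d.contains (P ++ PySem.Int.toStr j) = false) :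
    ((PySem.List.pyRange 0 K).foldl (fun d p => (PySem.List.pyRange 0 H).foldl (fun d i =>
        d.insert (P ++ PySem.Int.toStr (p * H + i)) (P ++ PySem.Int.toStr (vf p i))) d) d).items
      = d.items ++ pvSec P (K * H) vf' := by
  rw [pvNestedFold K H (fun d p i =>
    d.insert (P ++ PySem.Int.toStr (p * H + i)) (P ++ PySem.Int.toStr (vf p i))) d]
  have hkeys : (((PySem.List.pyRange 0 K).flatMap (fun p => (PySem.List.pyRange 0 H).map (fun i => (p, i)))).map
      (fun pi : Int × Int => P ++ PySem.Int.toStr (pi.1 * H + pi.2)))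
      = (PySem.List.pyRange 0 (K * H)).map (fun j => P ++ PySem.Int.toStr j) := by
    rw [List.map_flatMap]
    simp only [List.map_map]
    exact pvFlatRange K H hH (fun p i => P ++ PySem.Int.toStr (p * H + i))
      (fun j => P ++ PySem.Int.toStr j) (fun p i _ _ _ => rfl)
  have hbound : ∀ pi : Int × Int,
      pi ∈ (PySem.List.pyRange 0 K).flatMap (fun p => (PySem.List.pyRange 0 H).map (fun i => (p, i))) →
      0 ≤ pi.1 * H + pi.2 ∧ pi.1 * H + pi.2 < K * H := by
    intro pi hpi
    rcases List.mem_flatMap.mp hpi with ⟨p, hp, hmem⟩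
    rcases List.mem_map.mp hmem with ⟨i, hi, rfl⟩
    have hp' := PySem.List.mem_pyRange_one.mp hp
    have hi' := PySem.List.mem_pyRange_one.mp hi
    have h1 : 0 ≤ p * H := mul_nonneg hp'.1 (le_of_lt hH)
    have h2 : p * H ≤ (K - 1) * H := mul_le_mul_of_nonneg_right (by omega) (le_of_lt hH)
    have h3 : (K - 1) * H = K * H - H := by ring
    constructor <;> simp <;> omega
  rw [PySem.Dict.items_foldl_insert_fresh _
      (fun pi : Int × Int => P ++ PySem.Int.toStr (pi.1 * H + pi.2))
      (fun pi : Int × Int => P ++ PySem.Int.toStr (vf pi.1 pi.2)) d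
      (fun a ha => hfresh _ (hbound a ha).1 (hbound a ha).2)
      (hkeys ▸ pvKeysNodup P (K * H))]
  congr 1
  rw [List.map_flatMap]
  simp only [List.map_map]
  apply pvFlatRange K H hH
  intro p i hp hi hiH
  simp only [Function.comp_apply]
  rw [hvf p i hp hi hiH]

def pvIpm1 (h ips k : Int) : PySem.Dict String String :=
  (PySem.List.pyRange 0 k).foldl (fun d p =>
    (PySem.List.pyRange 0 h).foldl (fun d i =>
      d.insert ("acc" ++ PySem.Int.toStr (p * h + i))
               ("acc" ++ PySem.Int.toStr (p * h + PySem.Int.mod (i + ips) h))) d)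
    PySem.Dict.empty

def pvIpm2 (h ips k : Int) : PySem.Dict String String :=
  (PySem.List.pyRange 0 k).foldl (fun d p =>
    (PySem.List.pyRange 0 h).foldl (fun d i =>
      d.insert ("agg" ++ PySem.Int.toStr (p * h + i))
               ("agg" ++ PySem.Int.toStr (p * h + PySem.Int.mod (i + ips) h))) d)
    (pvIpm1 h ips k)

def pvIpm (h ips k : Int) : PySem.Dict String String :=
  (PySem.List.pyRange 0 (h * h)).foldl (fun d i =>
    d.insert ("core" ++ PySem.Int.toStr i)
             ("core" ++ PySem.Int.toStr (PySem.Int.mod (i + ips * h) (h * h)))) (pvIpm2 h ips k)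

def pvPmm1 (h ps k : Int) : PySem.Dict String String :=
  (PySem.List.pyRange 0 (k * h)).foldl (fun d i =>
    d.insert ("acc" ++ PySem.Int.toStr i)
             ("acc" ++ PySem.Int.toStr (PySem.Int.mod (i + ps * h) (k * h)))) PySem.Dict.empty

def pvPmm2 (h ps k : Int) : PySem.Dict String String :=
  (PySem.List.pyRange 0 (k * h)).foldl (fun d i =>
    d.insert ("agg" ++ PySem.Int.toStr i)
             ("agg" ++ PySem.Int.toStr (PySem.Int.mod (i + ps * h) (k * h)))) (pvPmm1 h ps k)

def pvPmm (h ps k variant : Int) : PySem.Dict String String :=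
  if variant == 1 then
    (PySem.List.pyRange 0 (h * h)).foldl (fun d i =>
      d.insert ("core" ++ PySem.Int.toStr i) ("core" ++ PySem.Int.toStr i)) (pvPmm2 h ps k)
  else
    (PySem.List.pyRange 0 h).foldl (fun d b =>
      (PySem.List.pyRange 0 h).foldl (fun d i =>
        d.insert ("core" ++ PySem.Int.toStr (b * h + i))
                 ("core" ++ PySem.Int.toStr (b * h + PySem.Int.mod (i + ps) h))) d) (pvPmm2 h ps k)

theorem pvAunfold (k target variant : Int) :
    getRelabelMap k target variant =
      ((pvIpm (PySem.Int.floordiv k 2) (PySem.Int.mod target (PySem.Int.floordiv k 2)) k).keys.foldl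
        (fun m node => m.insert node
          ((pvPmm (PySem.Int.floordiv k 2) (PySem.Int.floordiv target (PySem.Int.floordiv k 2)) k variant).getD
            ((pvIpm (PySem.Int.floordiv k 2) (PySem.Int.mod target (PySem.Int.floordiv k 2)) k).getD node "") ""))
        PySem.Dict.empty).items := rfl

theorem pvG1Split {h ips p i : Int} (hh : 0 < h) (hi0 : 0 ≤ i) (hih : i < h) :
    p * h + PySem.Int.mod (i + ips) h = pvG1 h ips (p * h + i) := by
  unfold pvG1
  rw [pvModSplit hh hi0 hih]
  omega

theorem pvIpm1Items (h ips k : Int) (hh : 0 < h) :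
    (pvIpm1 h ips k).items = pvSec "acc" (k * h) (pvG1 h ips) := by
  unfold pvIpm1
  rw [pvNestedInsertItems k h hh "acc" (fun p i => p * h + PySem.Int.mod (i + ips) h) (pvG1 h ips)
    (fun p i _ hi0 hih => pvG1Split hh hi0 hih) PySem.Dict.empty (fun _ _ _ => rfl)]
  rfl

theorem pvIpm2Items (h ips k : Int) (hh : 0 < h) :
    (pvIpm2 h ips k).items = pvSec "acc" (k * h) (pvG1 h ips) ++ pvSec "agg" (k * h) (pvG1 h ips) := by
  unfold pvIpm2
  rw [pvNestedInsertItems k h hh "agg" (fun p i => p * h + PySem.Int.mod (i + ips) h) (pvG1 h ips)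
    (fun p i _ hi0 hih => pvG1Split hh hi0 hih) (pvIpm1 h ips k)
    (fun j _ _ => pvNotContainsOfItems (pvIpm1Items h ips k hh)
      (fun p hp => by rcases pvMemSec hp with ⟨j', he⟩; rw [he]; exact pvAccNeAgg _ _))]
  rw [pvIpm1Items h ips k hh]

theorem pvIpmItems (h ips k : Int) (hh : 0 < h) :
    (pvIpm h ips k).items = pvSec "acc" (k * h) (pvG1 h ips) ++ (pvSec "agg" (k * h) (pvG1 h ips)
      ++ pvSec "core" (h * h) (fun i => PySem.Int.mod (i + ips * h) (h * h))) := by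
  unfold pvIpm
  rw [pvSingleInsertItems (h * h) "core" (fun i => PySem.Int.mod (i + ips * h) (h * h)) (pvIpm2 h ips k)
    (fun j _ _ => pvNotContainsOfItems (pvIpm2Items h ips k hh)
      (fun p hp => by
        rcases List.mem_append.mp hp with hp1 | hp2
        · rcases pvMemSec hp1 with ⟨j', he⟩; rw [he]; exact pvAccNeCore _ _
        · rcases pvMemSec hp2 with ⟨j', he⟩; rw [he]; exact pvAggNeCore _ _))]
  rw [pvIpm2Items h ips k hh, List.append_assoc]

theorem pvPmm1Items (h ps k : Int) :
    (pvPmm1 h ps k).items = pvSec "acc" (k * h) (fun i => PySem.Int.mod (i + ps * h) (k * h)) := by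
  unfold pvPmm1
  rw [pvSingleInsertItems (k * h) "acc" (fun i => PySem.Int.mod (i + ps * h) (k * h)) PySem.Dict.empty
    (fun _ _ _ => rfl)]
  rfl

theorem pvPmm2Items (h ps k : Int) :
    (pvPmm2 h ps k).items = pvSec "acc" (k * h) (fun i => PySem.Int.mod (i + ps * h) (k * h))
      ++ pvSec "agg" (k * h) (fun i => PySem.Int.mod (i + ps * h) (k * h)) := by
  unfold pvPmm2
  rw [pvSingleInsertItems (k * h) "agg" (fun i => PySem.Int.mod (i + ps * h) (k * h)) (pvPmm1 h ps k)
    (fun j _ _ => pvNotContainsOfItems (pvPmm1Items h ps k)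
      (fun p hp => by rcases pvMemSec hp with ⟨j', he⟩; rw [he]; exact pvAccNeAgg _ _))]
  rw [pvPmm1Items h ps k]

theorem pvPmmFresh (h ps k : Int) : ∀ j : Int, 0 ≤ j → j < h * h →
    (pvPmm2 h ps k).contains ("core" ++ PySem.Int.toStr j) = false := by
  intro j _ _
  exact pvNotContainsOfItems (pvPmm2Items h ps k)
    (fun p hp => by
      rcases List.mem_append.mp hp with hp1 | hp2
      · rcases pvMemSec hp1 with ⟨j', he⟩; rw [he]; exact pvAccNeCore _ _
      · rcases pvMemSec hp2 with ⟨j', he⟩; rw [he]; exact pvAggNeCore _ _)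

theorem pvPmmItems1 (h ps k : Int) :
    (pvPmm h ps k 1).items = pvSec "acc" (k * h) (fun i => PySem.Int.mod (i + ps * h) (k * h))
      ++ (pvSec "agg" (k * h) (fun i => PySem.Int.mod (i + ps * h) (k * h))
      ++ pvSec "core" (h * h) (fun i => i)) := by
  unfold pvPmm
  rw [if_pos (show ((1:Int) == 1) = true from rfl)]
  rw [pvSingleInsertItems (h * h) "core" (fun i => i) (pvPmm2 h ps k) (fun j h1 h2 => pvPmmFresh h ps k j h1 h2)]
  rw [pvPmm2Items h ps k, List.append_assoc]

theorem pvPmmItems2 (h ps k : Int) (hh : 0 < h) :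
    (pvPmm h ps k 2).items = pvSec "acc" (k * h) (fun i => PySem.Int.mod (i + ps * h) (k * h))
      ++ (pvSec "agg" (k * h) (fun i => PySem.Int.mod (i + ps * h) (k * h))
      ++ pvSec "core" (h * h) (pvG1 h ps)) := by
  unfold pvPmm
  rw [if_neg (show ¬((2:Int) == 1) = true by decide)]
  rw [pvNestedInsertItems h h hh "core" (fun b i => b * h + PySem.Int.mod (i + ps) h) (pvG1 h ps)
    (fun b i _ hi0 hih => pvG1Split hh hi0 hih) (pvPmm2 h ps k) (fun j h1 h2 => pvPmmFresh h ps k j h1 h2)]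
  rw [pvPmm2Items h ps k, List.append_assoc]

theorem pvSecKeys (P : String) (m : Int) (f : Int → Int) :
    (pvSec P m f).map (fun p => p.1) = (PySem.List.pyRange 0 m).map (fun j => P ++ PySem.Int.toStr j) := by
  simp [pvSec]

theorem pvDisjointKeys {P Q : String} {m m' : Int}
    (hPQ : ∀ s t : String, (P ++ s) ≠ (Q ++ t)) :
    ∀ a ∈ (PySem.List.pyRange 0 m).map (fun j => P ++ PySem.Int.toStr j),
      ∀ b ∈ (PySem.List.pyRange 0 m').map (fun j => Q ++ PySem.Int.toStr j), a ≠ b := by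
  intro a ha b hb
  rcases List.mem_map.mp ha with ⟨j, _, rfl⟩
  rcases List.mem_map.mp hb with ⟨j', _, rfl⟩
  exact hPQ _ _

theorem pvAllKeysNodup (m m' : Int) (f g c : Int → Int) :
    ((pvSec "acc" m f ++ (pvSec "agg" m g ++ pvSec "core" m' c)).map (fun p => p.1)).Nodup := by
  simp only [List.map_append, pvSecKeys]
  rw [List.nodup_append, List.nodup_append]
  refine ⟨pvKeysNodup "acc" m, ⟨pvKeysNodup "agg" m, pvKeysNodup "core" m', pvDisjointKeys pvAggNeCore⟩, ?_⟩
  intro a ha b hb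
  rcases List.mem_append.mp hb with hb1 | hb2
  · exact pvDisjointKeys pvAccNeAgg a ha b hb1
  · exact pvDisjointKeys pvAccNeCore a ha b hb2

theorem pvOfListItems (L : List (String × String)) (hnd : (L.map (fun p => p.1)).Nodup) :
    (PySem.Dict.ofList L).items = L := by
  rw [PySem.Dict.ofList, PySem.Dict.update]
  rw [PySem.Dict.items_foldl_insert_fresh L (fun p => p.1) (fun p => p.2) PySem.Dict.empty
    (fun _ _ => rfl) hnd]
  simp [PySem.Dict.empty]

theorem pvGetOfItems {d : PySem.Dict String String} {l : List (String × String)}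
    (h : d.items = l) (x : String) : d.get? x = (PySem.Dict.mk l).get? x := by
  rw [PySem.Dict.get?, PySem.Dict.get?, h]

theorem pvMainCore (k variant h ips ps : Int) (hk : 2 ≤ k) (hh : 0 < h) (hv : variant = 1 ∨ variant = 2) :
    ((pvIpm h ips k).keys.foldl (fun m node =>
        m.insert node ((pvPmm h ps k variant).getD ((pvIpm h ips k).getD node "") "")) PySem.Dict.empty).items
      = (PySem.Dict.ofList (pvSec "acc" (k * h) (fun j => PySem.Int.mod (pvG1 h ips j + ps * h) (k * h))
          ++ (pvSec "agg" (k * h) (fun j => PySem.Int.mod (pvG1 h ips j + ps * h) (k * h))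
          ++ pvSec "core" (h * h) (fun i =>
              if variant == 2 then pvG1 h ps (PySem.Int.mod (i + ips * h) (h * h))
              else PySem.Int.mod (i + ips * h) (h * h))))).items := by
  have hhh : 0 < h * h := mul_pos hh hh
  have hpcItems : (pvPmm h ps k variant).items
      = pvSec "acc" (k * h) (fun i => PySem.Int.mod (i + ps * h) (k * h))
        ++ (pvSec "agg" (k * h) (fun i => PySem.Int.mod (i + ps * h) (k * h))
        ++ pvSec "core" (h * h) (fun c => if variant == 2 then pvG1 h ps c else c)) := by
    rcases hv with rfl | rfl
    · rw [pvPmmItems1 h ps k]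
      have : (fun c : Int => if (1:Int) == 2 then pvG1 h ps c else c) = (fun c : Int => c) := by
        funext c; rfl
      rw [this]
    · rw [pvPmmItems2 h ps k hh]
      have : (fun c : Int => if (2:Int) == 2 then pvG1 h ps c else c) = pvG1 h ps := by
        funext c; rfl
      rw [this]
  have hkeys : (pvIpm h ips k).keys
      = (PySem.List.pyRange 0 (k * h)).map (fun j => "acc" ++ PySem.Int.toStr j)
        ++ ((PySem.List.pyRange 0 (k * h)).map (fun j => "agg" ++ PySem.Int.toStr j)
        ++ (PySem.List.pyRange 0 (h * h)).map (fun j => "core" ++ PySem.Int.toStr j)) := by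
    rw [show (pvIpm h ips k).keys = (pvIpm h ips k).items.map (fun p => p.1) from rfl,
      pvIpmItems h ips k hh]
    simp only [List.map_append, pvSecKeys]
  have hnodup : ((pvIpm h ips k).keys.map (fun node => node)).Nodup := by
    have h0 := pvAllKeysNodup (k * h) (h * h) (pvG1 h ips) (pvG1 h ips)
      (fun i => PySem.Int.mod (i + ips * h) (h * h))
    simp only [List.map_append, pvSecKeys] at h0
    rw [List.map_id', hkeys]
    exact h0
  rw [PySem.Dict.items_foldl_insert_fresh ((pvIpm h ips k).keys) (fun node => node)
    (fun node => (pvPmm h ps k variant).getD ((pvIpm h ips k).getD node "") "") PySem.Dict.empty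
    (fun _ _ => rfl) hnodup]
  rw [pvOfListItems _ (pvAllKeysNodup (k * h) (h * h) _ _ _)]
  rw [show PySem.Dict.empty.items = ([] : List (String × String)) from rfl, List.nil_append]
  rw [hkeys, List.map_append, List.map_append, List.map_map, List.map_map, List.map_map]
  congr 1
  · -- acc section
    apply List.map_congr_left
    intro j hj
    have hj0 := (PySem.List.mem_pyRange_one.mp hj).1
    have hjn := (PySem.List.mem_pyRange_one.mp hj).2
    have hb : 0 ≤ pvG1 h ips j ∧ pvG1 h ips j < k * h := pvG1Bounds hk hh hj0 hjn
    have hipmget : (pvIpm h ips k).get? ("acc" ++ PySem.Int.toStr j)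
        = some ("acc" ++ PySem.Int.toStr (pvG1 h ips j)) := by
      rw [pvGetOfItems (pvIpmItems h ips k hh), pvGetAppend, pvGetSec hj0 hjn, Option.some_or]
    have hpmmget : (pvPmm h ps k variant).get? ("acc" ++ PySem.Int.toStr (pvG1 h ips j))
        = some ("acc" ++ PySem.Int.toStr (PySem.Int.mod (pvG1 h ips j + ps * h) (k * h))) := by
      rw [pvGetOfItems hpcItems, pvGetAppend, pvGetSec hb.1 hb.2, Option.some_or]
    simp only [Function.comp_apply]
    simp only [PySem.Dict.getD, hipmget, Option.getD_some, hpmmget]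
  congr 1
  · -- agg section
    apply List.map_congr_left
    intro j hj
    have hj0 := (PySem.List.mem_pyRange_one.mp hj).1
    have hjn := (PySem.List.mem_pyRange_one.mp hj).2
    have hb : 0 ≤ pvG1 h ips j ∧ pvG1 h ips j < k * h := pvG1Bounds hk hh hj0 hjn
    have hipmget : (pvIpm h ips k).get? ("agg" ++ PySem.Int.toStr j)
        = some ("agg" ++ PySem.Int.toStr (pvG1 h ips j)) := by
      rw [pvGetOfItems (pvIpmItems h ips k hh),
        pvSkipSec (fun j' => pvAccNeAgg (PySem.Int.toStr j') (PySem.Int.toStr j)),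
        pvGetAppend, pvGetSec hj0 hjn, Option.some_or]
    have hpmmget : (pvPmm h ps k variant).get? ("agg" ++ PySem.Int.toStr (pvG1 h ips j))
        = some ("agg" ++ PySem.Int.toStr (PySem.Int.mod (pvG1 h ips j + ps * h) (k * h))) := by
      rw [pvGetOfItems hpcItems,
        pvSkipSec (fun j' => pvAccNeAgg (PySem.Int.toStr j') (PySem.Int.toStr (pvG1 h ips j))),
        pvGetAppend, pvGetSec hb.1 hb.2, Option.some_or]
    simp only [Function.comp_apply]
    simp only [PySem.Dict.getD, hipmget, Option.getD_some, hpmmget]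
  · -- core section
    apply List.map_congr_left
    intro i hi
    have hi0 := (PySem.List.mem_pyRange_one.mp hi).1
    have hin := (PySem.List.mem_pyRange_one.mp hi).2
    have hc0 : 0 ≤ PySem.Int.mod (i + ips * h) (h * h) := PySem.Int.mod_nonneg _ hhh
    have hcn : PySem.Int.mod (i + ips * h) (h * h) < h * h := PySem.Int.mod_lt _ hhh
    have hipmget : (pvIpm h ips k).get? ("core" ++ PySem.Int.toStr i)
        = some ("core" ++ PySem.Int.toStr (PySem.Int.mod (i + ips * h) (h * h))) := by
      rw [pvGetOfItems (pvIpmItems h ips k hh),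
        pvSkipSec (fun j' => pvAccNeCore (PySem.Int.toStr j') (PySem.Int.toStr i)),
        pvSkipSec (fun j' => pvAggNeCore (PySem.Int.toStr j') (PySem.Int.toStr i)),
        pvGetSec hi0 hin]
    have hpmmget : (pvPmm h ps k variant).get? ("core" ++ PySem.Int.toStr (PySem.Int.mod (i + ips * h) (h * h)))
        = some ("core" ++ PySem.Int.toStr
            (if variant == 2 then pvG1 h ps (PySem.Int.mod (i + ips * h) (h * h))
             else PySem.Int.mod (i + ips * h) (h * h))) := by
      rw [pvGetOfItems hpcItems,
        pvSkipSec (fun j' => pvAccNeCore (PySem.Int.toStr j') _),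
        pvSkipSec (fun j' => pvAggNeCore (PySem.Int.toStr j') _),
        pvGetSec hc0 hcn]
    simp only [Function.comp_apply]
    simp only [PySem.Dict.getD, hipmget, Option.getD_some, hpmmget]

theorem pvBSec (P : String) (k h ips ps : Int) (hh : 0 < h) :
    (PySem.List.pyRange 0 k).flatMap (fun p => (PySem.List.pyRange 0 h).map (fun i =>
        (P ++ PySem.Int.toStr (p * h + i),
         P ++ PySem.Int.toStr (PySem.Int.mod (p * h + PySem.Int.mod (i + ips) h + ps * h) (k * h)))))
      = pvSec P (k * h) (fun j => PySem.Int.mod (pvG1 h ips j + ps * h) (k * h)) := by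
  apply pvFlatRange k h hh
  intro p i _ hi0 hih
  rw [pvG1Split hh hi0 hih]

theorem pvBEq (k target variant : Int) (hh : 0 < PySem.Int.floordiv k 2) :
    getRelabelMap_alt k target variant
      = (PySem.Dict.ofList (pvSec "acc" (k * PySem.Int.floordiv k 2)
            (fun j => PySem.Int.mod (pvG1 (PySem.Int.floordiv k 2) (PySem.Int.mod target (PySem.Int.floordiv k 2)) j
              + PySem.Int.floordiv target (PySem.Int.floordiv k 2) * PySem.Int.floordiv k 2)
              (k * PySem.Int.floordiv k 2))
          ++ (pvSec "agg" (k * PySem.Int.floordiv k 2)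
            (fun j => PySem.Int.mod (pvG1 (PySem.Int.floordiv k 2) (PySem.Int.mod target (PySem.Int.floordiv k 2)) j
              + PySem.Int.floordiv target (PySem.Int.floordiv k 2) * PySem.Int.floordiv k 2)
              (k * PySem.Int.floordiv k 2))
          ++ pvSec "core" (PySem.Int.floordiv k 2 * PySem.Int.floordiv k 2)
            (fun i => if variant == 2 then
                pvG1 (PySem.Int.floordiv k 2) (PySem.Int.floordiv target (PySem.Int.floordiv k 2))
                  (PySem.Int.mod (i + PySem.Int.mod target (PySem.Int.floordiv k 2) * PySem.Int.floordiv k 2)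
                    (PySem.Int.floordiv k 2 * PySem.Int.floordiv k 2))
              else PySem.Int.mod (i + PySem.Int.mod target (PySem.Int.floordiv k 2) * PySem.Int.floordiv k 2)
                    (PySem.Int.floordiv k 2 * PySem.Int.floordiv k 2))))).items := by
  rw [show getRelabelMap_alt k target variant
      = (PySem.Dict.ofList (
          (PySem.List.pyRange 0 k).flatMap (fun p => (PySem.List.pyRange 0 (PySem.Int.floordiv k 2)).map (fun i =>
            ("acc" ++ PySem.Int.toStr (p * PySem.Int.floordiv k 2 + i),
             "acc" ++ PySem.Int.toStr (PySem.Int.mod (p * PySem.Int.floordiv k 2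
               + PySem.Int.mod (i + PySem.Int.mod target (PySem.Int.floordiv k 2)) (PySem.Int.floordiv k 2)
               + PySem.Int.floordiv target (PySem.Int.floordiv k 2) * PySem.Int.floordiv k 2)
               (k * PySem.Int.floordiv k 2)))))
          ++ (PySem.List.pyRange 0 k).flatMap (fun p => (PySem.List.pyRange 0 (PySem.Int.floordiv k 2)).map (fun i =>
            ("agg" ++ PySem.Int.toStr (p * PySem.Int.floordiv k 2 + i),
             "agg" ++ PySem.Int.toStr (PySem.Int.mod (p * PySem.Int.floordiv k 2
               + PySem.Int.mod (i + PySem.Int.mod target (PySem.Int.floordiv k 2)) (PySem.Int.floordiv k 2)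
               + PySem.Int.floordiv target (PySem.Int.floordiv k 2) * PySem.Int.floordiv k 2)
               (k * PySem.Int.floordiv k 2)))))
          ++ pvSec "core" (PySem.Int.floordiv k 2 * PySem.Int.floordiv k 2)
            (fun i => if variant == 2 then
                pvG1 (PySem.Int.floordiv k 2) (PySem.Int.floordiv target (PySem.Int.floordiv k 2))
                  (PySem.Int.mod (i + PySem.Int.mod target (PySem.Int.floordiv k 2) * PySem.Int.floordiv k 2)
                    (PySem.Int.floordiv k 2 * PySem.Int.floordiv k 2))
              else PySem.Int.mod (i + PySem.Int.mod target (PySem.Int.floordiv k 2) * PySem.Int.floordiv k 2)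
                    (PySem.Int.floordiv k 2 * PySem.Int.floordiv k 2)))).items from rfl]
  rw [pvBSec "acc" k (PySem.Int.floordiv k 2) (PySem.Int.mod target (PySem.Int.floordiv k 2))
      (PySem.Int.floordiv target (PySem.Int.floordiv k 2)) hh,
    pvBSec "agg" k (PySem.Int.floordiv k 2) (PySem.Int.mod target (PySem.Int.floordiv k 2))
      (PySem.Int.floordiv target (PySem.Int.floordiv k 2)) hh,
    List.append_assoc]

theorem pvIpmItemsNeg (h ips k : Int) (hk : k ≤ 0) :
    (pvIpm h ips k).items = pvSec "core" (h * h) (fun i => PySem.Int.mod (i + ips * h) (h * h)) := by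
  unfold pvIpm pvIpm2 pvIpm1
  rw [PySem.List.pyRange_one_eq_nil hk]
  simp only [List.foldl_nil]
  rw [pvSingleInsertItems (h * h) "core" (fun i => PySem.Int.mod (i + ips * h) (h * h))
    PySem.Dict.empty (fun _ _ _ => rfl)]
  rfl

theorem pvMainCoreNeg (k h ips ps : Int) (hk : k ≤ -2) (hhn : h ≤ -1) :
    ((pvIpm h ips k).keys.foldl (fun m node =>
        m.insert node ((pvPmm h ps k 1).getD ((pvIpm h ips k).getD node "") "")) PySem.Dict.empty).items
      = pvSec "core" (h * h) (fun i => PySem.Int.mod (i + ips * h) (h * h)) := by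
  have hhh : 0 < h * h := mul_pos_of_neg_of_neg (by omega) (by omega)
  have hkeys : (pvIpm h ips k).keys
      = (PySem.List.pyRange 0 (h * h)).map (fun j => "core" ++ PySem.Int.toStr j) := by
    rw [show (pvIpm h ips k).keys = (pvIpm h ips k).items.map (fun p => p.1) from rfl,
      pvIpmItemsNeg h ips k (by omega)]
    exact pvSecKeys "core" (h * h) _
  have hnodup : ((pvIpm h ips k).keys.map (fun node => node)).Nodup := by
    rw [List.map_id', hkeys]
    exact pvKeysNodup "core" (h * h)
  rw [PySem.Dict.items_foldl_insert_fresh ((pvIpm h ips k).keys) (fun node => node)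
    (fun node => (pvPmm h ps k 1).getD ((pvIpm h ips k).getD node "") "") PySem.Dict.empty
    (fun _ _ => rfl) hnodup]
  rw [show PySem.Dict.empty.items = ([] : List (String × String)) from rfl, List.nil_append]
  rw [hkeys, List.map_map]
  apply List.map_congr_left
  intro i hi
  have hi0 := (PySem.List.mem_pyRange_one.mp hi).1
  have hin := (PySem.List.mem_pyRange_one.mp hi).2
  have hc0 : 0 ≤ PySem.Int.mod (i + ips * h) (h * h) := PySem.Int.mod_nonneg _ hhh
  have hcn : PySem.Int.mod (i + ips * h) (h * h) < h * h := PySem.Int.mod_lt _ hhh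
  have hipmget : (pvIpm h ips k).get? ("core" ++ PySem.Int.toStr i)
      = some ("core" ++ PySem.Int.toStr (PySem.Int.mod (i + ips * h) (h * h))) := by
    rw [pvGetOfItems (pvIpmItemsNeg h ips k (by omega)), pvGetSec hi0 hin]
  have hpmmget : (pvPmm h ps k 1).get? ("core" ++ PySem.Int.toStr (PySem.Int.mod (i + ips * h) (h * h)))
      = some ("core" ++ PySem.Int.toStr (PySem.Int.mod (i + ips * h) (h * h))) := by
    rw [pvGetOfItems (pvPmmItems1 h ps k),
      pvSkipSec (fun j' => pvAccNeCore (PySem.Int.toStr j') _),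
      pvSkipSec (fun j' => pvAggNeCore (PySem.Int.toStr j') _),
      pvGetSec hc0 hcn]
  simp only [Function.comp_apply]
  simp only [PySem.Dict.getD, hipmget, Option.getD_some, hpmmget]

theorem pvBEqNeg (k target : Int) (hk : k ≤ -2) :
    getRelabelMap_alt k target 1
      = pvSec "core" (PySem.Int.floordiv k 2 * PySem.Int.floordiv k 2)
          (fun i => PySem.Int.mod (i + PySem.Int.mod target (PySem.Int.floordiv k 2) * PySem.Int.floordiv k 2)
            (PySem.Int.floordiv k 2 * PySem.Int.floordiv k 2)) := by
  rw [show getRelabelMap_alt k target 1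
      = (PySem.Dict.ofList (
          (PySem.List.pyRange 0 k).flatMap (fun p => (PySem.List.pyRange 0 (PySem.Int.floordiv k 2)).map (fun i =>
            ("acc" ++ PySem.Int.toStr (p * PySem.Int.floordiv k 2 + i),
             "acc" ++ PySem.Int.toStr (PySem.Int.mod (p * PySem.Int.floordiv k 2
               + PySem.Int.mod (i + PySem.Int.mod target (PySem.Int.floordiv k 2)) (PySem.Int.floordiv k 2)
               + PySem.Int.floordiv target (PySem.Int.floordiv k 2) * PySem.Int.floordiv k 2)
               (k * PySem.Int.floordiv k 2)))))
          ++ (PySem.List.pyRange 0 k).flatMap (fun p => (PySem.List.pyRange 0 (PySem.Int.floordiv k 2)).map (fun i =>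
            ("agg" ++ PySem.Int.toStr (p * PySem.Int.floordiv k 2 + i),
             "agg" ++ PySem.Int.toStr (PySem.Int.mod (p * PySem.Int.floordiv k 2
               + PySem.Int.mod (i + PySem.Int.mod target (PySem.Int.floordiv k 2)) (PySem.Int.floordiv k 2)
               + PySem.Int.floordiv target (PySem.Int.floordiv k 2) * PySem.Int.floordiv k 2)
               (k * PySem.Int.floordiv k 2)))))
          ++ pvSec "core" (PySem.Int.floordiv k 2 * PySem.Int.floordiv k 2)
            (fun i => PySem.Int.mod (i + PySem.Int.mod target (PySem.Int.floordiv k 2) * PySem.Int.floordiv k 2)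
                    (PySem.Int.floordiv k 2 * PySem.Int.floordiv k 2)))).items from rfl]
  rw [PySem.List.pyRange_one_eq_nil (show k ≤ 0 by omega)]
  simp only [List.flatMap_nil, List.nil_append]
  exact pvOfListItems _ (by rw [pvSecKeys]; exact pvKeysNodup "core" _)

theorem pvMainEq (k target variant : Int)
    (hks : 2 ≤ k ∨ (k ≤ -2 ∧ variant = 1)) (hv : variant = 1 ∨ variant = 2) :
    getRelabelMap k target variant = getRelabelMap_alt k target variant := by
  rcases hks with hk2 | ⟨hkneg, hv1⟩
  · have hh : 0 < PySem.Int.floordiv k 2 := by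
      rw [PySem.Int.floordiv_eq_ediv_of_pos (by omega : (0:Int) < 2)]
      omega
    rw [pvAunfold]
    rw [pvMainCore k variant (PySem.Int.floordiv k 2) (PySem.Int.mod target (PySem.Int.floordiv k 2))
      (PySem.Int.floordiv target (PySem.Int.floordiv k 2)) hk2 hh hv]
    rw [pvBEq k target variant hh]
  · subst hv1
    have hhn : PySem.Int.floordiv k 2 ≤ -1 := by
      rw [PySem.Int.floordiv_eq_ediv_of_pos (by omega : (0:Int) < 2)]
      omega
    rw [pvAunfold]
    rw [pvMainCoreNeg k (PySem.Int.floordiv k 2) (PySem.Int.mod target (PySem.Int.floordiv k 2))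
      (PySem.Int.floordiv target (PySem.Int.floordiv k 2)) hkneg hhn]
    rw [pvBEqNeg k target hkneg]

-- ===== VERDICT (by name: the statement is the Claim_ definition above) =====
theorem getRelabelMap_spec : Claim_equal_getRelabelMap := by
  intro k target variant _ hpre
  exact pvMainEq k target variant hpre.1 hpre.2.2
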